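-- pv_equiv track=rewrite | github.com/medrimonia/team_repartition | drop_in_creator.py | allowedTeams
-- ===== SOURCE A (Python) =====
-- nb_teams=6
--
-- nb_rounds=10
--
-- def getOccurences(rounds, position_idx):
--     dic = {}
--     for team_id in range(nb_teams):
--         dic[team_id] = 0
--     for r in rounds:
--         for game in r:
--             for team in game:
--                 for idx in range(min(position_idx+1,len(team))):
--                     dic[team[idx]] += 1
--     return dic
--
-- def allowedTeams(rounds, position_idx):
--     occ_by_team = getOccurences(rounds,position_idx)
--     min_occ = nb_rounds# Max score per round: 1
--     allowed_teams = []
--     for team_id in range(nb_teams):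
--         if occ_by_team[team_id] == min_occ:
--             allowed_teams += [team_id]
--         elif occ_by_team[team_id] < min_occ:
--             # Reset list of allowed teams if we found a team who played less
--             allowed_teams = [team_id]
--             min_occ = occ_by_team[team_id]
--     return allowed_teams
-- ===== SOURCE B (Python) =====
-- nb_teams = 6
--
-- nb_rounds = 10
--
-- def allowedTeams(rounds, position_idx):
--     occ = {t: 0 for t in range(nb_teams)}
--     for r in rounds:
--         for game in r:
--             for team in game:
--                 for idx in range(min(position_idx + 1, len(team))):
--                     occ[team[idx]] += 1
--     cand = [t for t in range(nb_teams) if occ[t] <= nb_rounds]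
--     if not cand:
--         return []
--     m = min(occ[t] for t in cand)
--     return [t for t in cand if occ[t] == m]
-- ===== Notes on version B (the rewrite author's own statement) =====
-- stated objective: alternative
-- what changed: B replaces A's running-min-with-reset accumulator loop over team ids by a compute-then-filter decomposition: candidates within the nb_rounds budget, then the minimum count over candidates, then a filter; the occurrence counting (and its KeyError on malformed team ids) is kept as in A.
import Mathlib
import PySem

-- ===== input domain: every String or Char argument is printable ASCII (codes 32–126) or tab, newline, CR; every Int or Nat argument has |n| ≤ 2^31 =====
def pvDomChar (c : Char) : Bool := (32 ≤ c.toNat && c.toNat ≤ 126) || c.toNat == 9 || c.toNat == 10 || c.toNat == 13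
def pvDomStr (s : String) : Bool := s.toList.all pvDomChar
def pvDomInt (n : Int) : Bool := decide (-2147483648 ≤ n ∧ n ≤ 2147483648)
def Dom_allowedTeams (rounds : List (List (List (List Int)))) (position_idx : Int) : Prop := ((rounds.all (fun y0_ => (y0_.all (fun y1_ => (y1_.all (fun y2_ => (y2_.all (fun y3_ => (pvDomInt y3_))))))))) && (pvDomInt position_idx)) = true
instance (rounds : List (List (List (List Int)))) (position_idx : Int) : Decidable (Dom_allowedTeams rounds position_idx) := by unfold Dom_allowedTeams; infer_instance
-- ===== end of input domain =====

-- B keeps A's occurrence counting but replaces the running-min-with-reset loop by a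
-- compute-candidates/min/filter decomposition; same cost.

-- ===== PORT A =====
-- dic[team[idx]] += 1 raises KeyError when the key is absent; Pre_ guarantees all counted
-- keys lie in 0..5 (pre-seeded), where Dict.modify is exact.
def getOccurencesA (rounds : List (List (List (List Int)))) (position_idx : Int) : PySem.Dict Int Int :=
  let dic := (PySem.List.pyRange 0 6 1).foldl (fun d team_id => d.insert team_id 0) PySem.Dict.empty
  rounds.foldl (fun dic r =>
    r.foldl (fun dic game =>
      game.foldl (fun dic team =>
        (PySem.List.pyRange 0 (min (position_idx + 1) (team.length : Int)) 1).foldl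
          (fun dic idx => dic.modify (PySem.List.pyGetD team idx 0) 0 (· + 1)) dic)
        dic)
      dic)
    dic

-- occ_by_team[team_id]: the key is always present (pre-seeded 0..5), so getD is exact.
def allowedTeams (rounds : List (List (List (List Int)))) (position_idx : Int) : List Int :=
  let occ := getOccurencesA rounds position_idx
  ((PySem.List.pyRange 0 6 1).foldl (fun (s : Int × List Int) team_id =>
      if occ.getD team_id 0 == s.1 then (s.1, s.2 ++ [team_id])
      else if occ.getD team_id 0 < s.1 then (occ.getD team_id 0, [team_id])
      else s)
    (10, [])).2

-- ===== PORT B =====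
-- Counting as in Source B: pre-seeded dict comprehension, then occ[team[idx]] += 1 (KeyError
-- outside 0..5, exactly as A; Pre_ guarantees presence, where Dict.modify is exact).
def allowedTeams_alt (rounds : List (List (List (List Int)))) (position_idx : Int) : List Int :=
  let occ := rounds.foldl (fun occ r =>
    r.foldl (fun occ game =>
      game.foldl (fun occ team =>
        (PySem.List.pyRange 0 (min (position_idx + 1) (team.length : Int)) 1).foldl
          (fun occ idx => occ.modify (PySem.List.pyGetD team idx 0) 0 (· + 1)) occ)
        occ)
      occ)
    ((PySem.List.pyRange 0 6 1).foldl (fun d t => d.insert t 0) (PySem.Dict.empty : PySem.Dict Int Int))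
  let cand := (PySem.List.pyRange 0 6 1).filter (fun t => decide (occ.getD t 0 ≤ 10))
  if cand.isEmpty then []
  else
    let m := (PySem.List.min? (cand.map (fun t => occ.getD t 0)) (fun x => x)).getD 0
    cand.filter (fun t => occ.getD t 0 == m)

-- ===== PRECONDITION & SPEC =====
-- Pre_ excludes exactly the inputs on which A (and B) raises KeyError: a counted entry
-- team[idx] (idx < min(position_idx+1, len(team))) outside range(6).
def Pre_allowedTeams (rounds : List (List (List (List Int)))) (position_idx : Int) : Prop :=
  ∀ r ∈ rounds, ∀ game ∈ r, ∀ team ∈ game,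
    ∀ x ∈ team.take (min (position_idx + 1) (team.length : Int)).toNat, 0 ≤ x ∧ x < 6
instance (rounds : List (List (List (List Int)))) (position_idx : Int) : Decidable (Pre_allowedTeams rounds position_idx) := by unfold Pre_allowedTeams; infer_instance

def pvWitness_allowedTeams : List (List (List (List Int))) × Int := ([[[[0, 1], [2, 3]], [[4, 5], [0, 2]]]], 1)

def Spec_allowedTeams (rounds : List (List (List (List Int)))) (position_idx : Int) (out : List Int) : Prop := out = allowedTeams_alt rounds position_idx
instance (rounds : List (List (List (List Int)))) (position_idx : Int) (out : List Int) : Decidable (Spec_allowedTeams rounds position_idx out) := by unfold Spec_allowedTeams; infer_instance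

-- ===== CLAIM (what is proved, stated in full; the proofs are below) =====
def Claim_equal_allowedTeams : Prop := ∀ (rounds : List (List (List (List Int)))) (position_idx : Int), Dom_allowedTeams rounds position_idx → Pre_allowedTeams rounds position_idx → Spec_allowedTeams rounds position_idx (allowedTeams rounds position_idx)

-- ===== LEMMAS AND PROOFS =====

-- running minimum
def pvM (f : Int → Int) (ts : List Int) : Int := ts.foldl (fun m t => min m (f t)) 10

-- B's candidate/min/filter decomposition, abstracted over the count function
def pvSelB (f : Int → Int) (ts : List Int) : List Int :=
  let cand := ts.filter (fun t => decide (f t ≤ 10))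
  if cand.isEmpty then []
  else
    let m := (PySem.List.min? (cand.map f) (fun x => x)).getD 0
    cand.filter (fun t => f t == m)

theorem pv_foldl_min_le_init (f : Int → Int) (ts : List Int) (i : Int) :
    ts.foldl (fun m t => min m (f t)) i ≤ i := by
  induction ts generalizing i with
  | nil => simp
  | cons a l ih => exact le_trans (ih (min i (f a))) (min_le_left _ _)

theorem pv_foldl_min_le_mem (f : Int → Int) (ts : List Int) (i : Int) {s : Int} (hs : s ∈ ts) :
    ts.foldl (fun m t => min m (f t)) i ≤ f s := by
  induction ts generalizing i with
  | nil => simp at hs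
  | cons a l ih =>
    rcases List.mem_cons.mp hs with h | h
    · subst h
      exact le_trans (pv_foldl_min_le_init f l (min i (f s))) (min_le_right _ _)
    · exact ih (min i (f a)) h

theorem pv_foldl_min_cases (f : Int → Int) (ts : List Int) (i : Int) :
    ts.foldl (fun m t => min m (f t)) i = i ∨ ∃ s ∈ ts, ts.foldl (fun m t => min m (f t)) i = f s := by
  induction ts generalizing i with
  | nil => exact Or.inl rfl
  | cons a l ih =>
    rcases ih (min i (f a)) with h | ⟨s, hs, h⟩
    · rcases min_cases i (f a) with ⟨hm, _⟩ | ⟨hm, _⟩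
      · exact Or.inl (by rw [List.foldl_cons, h, hm])
      · exact Or.inr ⟨a, List.mem_cons_self, by rw [List.foldl_cons, h, hm]⟩
    · exact Or.inr ⟨s, List.mem_cons_of_mem _ hs, h⟩

theorem pvM_le_ten (f : Int → Int) (ts : List Int) : pvM f ts ≤ 10 :=
  pv_foldl_min_le_init f ts 10
theorem pvM_le_mem (f : Int → Int) (ts : List Int) {s : Int} (hs : s ∈ ts) : pvM f ts ≤ f s :=
  pv_foldl_min_le_mem f ts 10 hs
theorem pvM_cases (f : Int → Int) (ts : List Int) : pvM f ts = 10 ∨ ∃ s ∈ ts, pvM f ts = f s :=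
  pv_foldl_min_cases f ts 10

-- A's running-min-with-reset fold computes (min, filter-by-min)
theorem pv_selA (f : Int → Int) (ts : List Int) :
    ts.foldl (fun (s : Int × List Int) t =>
        if f t == s.1 then (s.1, s.2 ++ [t])
        else if f t < s.1 then (f t, [t])
        else s) (10, [])
      = (pvM f ts, ts.filter (fun t => f t == pvM f ts)) := by
  induction ts using List.reverseRecOn with
  | nil => simp [pvM]
  | append_singleton ts t ih =>
    have hM : pvM f (ts ++ [t]) = min (pvM f ts) (f t) := by
      simp [pvM, List.foldl_append]
    rw [List.foldl_append, ih]
    simp only [List.foldl_cons, List.foldl_nil]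
    by_cases h1 : f t = pvM f ts
    · have : (f t == pvM f ts) = true := by simp [h1]
      rw [this]
      simp only [if_true]
      rw [hM]
      have hmin : min (pvM f ts) (f t) = pvM f ts := by omega
      rw [hmin, List.filter_append]
      simp [h1]
    · have hbeq : (f t == pvM f ts) = false := by simp [h1]
      rw [hbeq]
      simp only [Bool.false_eq_true, if_false]
      by_cases h2 : f t < pvM f ts
      · rw [if_pos h2, hM]
        have hmin : min (pvM f ts) (f t) = f t := by omega
        rw [hmin, List.filter_append]
        have hnil : ts.filter (fun s => f s == f t) = [] := by
          rw [List.filter_eq_nil_iff]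
          intro s hs
          have := pvM_le_mem f ts hs
          simp only [beq_iff_eq]
          omega
        simp [hnil]
      · rw [if_neg h2, hM]
        have hmin : min (pvM f ts) (f t) = pvM f ts := by omega
        rw [hmin, List.filter_append]
        simp [h1]

-- B's decomposition computes the same filter
theorem pv_selB (f : Int → Int) (ts : List Int) :
    pvSelB f ts = ts.filter (fun t => f t == pvM f ts) := by
  rw [pvSelB]
  have hM10 := pvM_le_ten f ts
  by_cases hc : (ts.filter (fun t => decide (f t ≤ 10))).isEmpty
  · simp only [hc, if_true]
    have hall : ∀ s ∈ ts, ¬ (f s ≤ 10) := by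
      intro s hs hle
      have : s ∈ ts.filter (fun t => decide (f t ≤ 10)) := List.mem_filter.mpr ⟨hs, by simpa⟩
      rw [List.isEmpty_iff.mp hc] at this
      simp at this
    symm
    rw [List.filter_eq_nil_iff]
    intro s hs
    have := hall s hs
    simp only [beq_iff_eq]
    omega
  · simp only [hc, Bool.false_eq_true, if_false]
    have hne : ts.filter (fun t => decide (f t ≤ 10)) ≠ [] := by
      simpa [List.isEmpty_iff] using hc
    set cand := ts.filter (fun t => decide (f t ≤ 10)) with hcand
    have hmapne : cand.map f ≠ [] := by simpa using hne
    obtain ⟨v, hv⟩ : ∃ v, PySem.List.min? (cand.map f) (fun x => x) = some v := by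
      cases h : PySem.List.min? (cand.map f) (fun x => x) with
      | none => exact absurd ((PySem.List.min?_eq_none_iff _ _).mp h) hmapne
      | some v => exact ⟨v, rfl⟩
    have hvmem : v ∈ cand.map f := PySem.List.min?_mem hv
    have hvmin : ∀ y ∈ cand.map f, v ≤ y := by
      intro y hy
      exact PySem.List.min?_isMin hv y hy
    have hMv : v = pvM f ts := by
      obtain ⟨s, hs, hfs⟩ := List.mem_map.mp hvmem
      obtain ⟨hsts, hsle⟩ := List.mem_filter.mp hs
      have hle1 : pvM f ts ≤ v := by rw [← hfs]; exact pvM_le_mem f ts hsts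
      have hle2 : v ≤ pvM f ts := by
        rcases pvM_cases f ts with h10 | ⟨s0, hs0, hMs0⟩
        · obtain ⟨c, hc1⟩ := List.exists_mem_of_ne_nil cand hne
          obtain ⟨hcts, hcle⟩ := List.mem_filter.mp hc1
          have h1 : pvM f ts ≤ f c := pvM_le_mem f ts hcts
          have h2 : f c ≤ 10 := by simpa using hcle
          have h3 : v ≤ f c := hvmin _ (List.mem_map.mpr ⟨c, hc1, rfl⟩)
          omega
        · have hs0c : s0 ∈ cand := List.mem_filter.mpr ⟨hs0, by simp; omega⟩
          have h3 : v ≤ f s0 := hvmin _ (List.mem_map.mpr ⟨s0, hs0c, rfl⟩)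
          omega
      omega
    rw [hv]
    simp only [Option.getD_some, hMv, hcand]
    rw [List.filter_filter]
    apply List.filter_congr
    intro s hs
    by_cases h : f s = pvM f ts
    · simp only [h]
      simp
      exact hM10
    · simp [h]

theorem pv_final (f : Int → Int) (ts : List Int) :
    (ts.foldl (fun (s : Int × List Int) t =>
        if f t == s.1 then (s.1, s.2 ++ [t])
        else if f t < s.1 then (f t, [t])
        else s) (10, [])).2 = pvSelB f ts := by
  rw [pv_selA, pv_selB]

-- ===== VERDICT (by name: the statement is the Claim_ definition above) =====
theorem allowedTeams_spec : Claim_equal_allowedTeams := by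
  intro rounds position_idx _ _
  show allowedTeams rounds position_idx = allowedTeams_alt rounds position_idx
  exact pv_final (fun t : Int => (getOccurencesA rounds position_idx).getD t 0)
    (PySem.List.pyRange 0 6 1)
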